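-- pv_equiv track=rewrite | github.com/Yohannes-Asfaw/competitive-programming | 2195-append-k-integers-with-minimal-sum/2195-append-k-integers-with-minimal-sum.py | minimalKSum
-- ===== SOURCE A (Python) =====
-- from typing import List
--
-- def minimalKSum(nums: List[int], k: int) -> int:
--     ans=0
--     nums.append(0)
--     nums.sort()
--     for a,b in zip(nums,nums[1:]):
--         if a==b:
--             continue
--         l=a+1
--         r=min(a+k,b-1)
--         ans+=(r+l)*(r-l+1)//2
--         k-=(r-l+1)
--         if k==0:
--             return(ans)
--     if k>0:
--         l=nums[-1]+1
--         r=nums[-1]+k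
--         ans+=(r+l)*(r-l+1)//2
--     return(ans)
-- ===== SOURCE B (Python) =====
-- from typing import List
--
-- def minimalKSum(nums: List[int], k: int) -> int:
--     # Same in-place mutation as A: append the 0 anchor and sort.
--     nums.append(0)
--     nums.sort()
--     if k <= 0:
--         return 0
--     m = nums[0]
--     # x = the k-th smallest integer missing from nums and greater than m:
--     # start at m+k and push it up once for each distinct present value in (m, x].
--     x = m + k
--     s = 0          # sum of the distinct present values in (m, x]
--     prev = m
--     for v in nums:
--         if v <= prev:
--             continue
--         if v <= x:
--             x += 1
--             s += v
--             prev = v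
--         else:
--             break
--     # answer = sum(m+1 .. x) minus the present values inside that range
--     return (m + 1 + x) * (x - m) // 2 - s
-- ===== Notes on version B (the rewrite author's own statement) =====
-- stated objective: alternative
-- what changed: A fills the k missing integers gap by gap, accumulating a partial sum and decrementing k in each gap with an early return; B first locates the k-th missing integer x > min(nums,0) by a single scan that pushes x up once per distinct present value in (m, x], then returns one global closed-form sum(m+1..x) minus the present values in that range.
-- outside the precondition, e.g. on minimalKSum([5], -3): A returns 3, B returns 0
import Mathlib
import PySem

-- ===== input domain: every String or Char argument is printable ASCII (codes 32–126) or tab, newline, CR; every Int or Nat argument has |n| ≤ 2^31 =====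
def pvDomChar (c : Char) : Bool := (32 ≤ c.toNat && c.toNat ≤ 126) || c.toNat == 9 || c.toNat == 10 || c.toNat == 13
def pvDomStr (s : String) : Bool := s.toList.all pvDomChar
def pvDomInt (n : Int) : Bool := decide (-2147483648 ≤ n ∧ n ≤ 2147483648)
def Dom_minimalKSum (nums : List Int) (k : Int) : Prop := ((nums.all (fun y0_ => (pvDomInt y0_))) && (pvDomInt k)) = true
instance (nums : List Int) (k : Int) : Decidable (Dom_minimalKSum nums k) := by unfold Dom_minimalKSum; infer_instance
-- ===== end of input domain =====

-- B replaces A's gap-by-gap fill with a threshold scan plus one closed-form sum; both mutate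
-- the caller's list (append 0 + sort) identically, the equivalence proved is about the return value.


-- ===== PORT A =====
-- A's for-loop over zip(nums, nums[1:]) with state (ans, k) and an early return (third component)
def aGo : List (Int × Int) → Int → Int → Int × Int × Bool
  | [], ans, k => (ans, k, false)
  | (a, b) :: t, ans, k =>
    if a = b then aGo t ans k
    else
      let l := a + 1
      let r := min (a + k) (b - 1)
      let ans' := ans + PySem.Int.floordiv ((r + l) * (r - l + 1)) 2
      let k' := k - (r - l + 1)
      if k' = 0 then (ans', k', true) else aGo t ans' k'

def minimalKSum (nums : List Int) (k : Int) : Int :=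
  let ns := PySem.List.sorted (nums ++ [0]) (fun y => y) false
  match aGo (ns.zip ns.tail) 0 k with
  | (ans, k', early) =>
    if early then ans
    else if 0 < k' then
      -- nums[-1]: ns is nonempty (it contains the appended 0), so getLastD is exact
      let last := ns.getLastD 0
      let l := last + 1
      let r := last + k'
      ans + PySem.Int.floordiv ((r + l) * (r - l + 1)) 2
    else ans

-- ===== PORT B =====
-- B's for-loop over the sorted list with state (prev, x, s); the break returns the state
def bGo : Int → Int → Int → List Int → Int × Int
  | _, x, s, [] => (x, s)
  | prev, x, s, v :: t =>
    if v ≤ prev then bGo prev x s t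
    else if v ≤ x then bGo v (x + 1) (s + v) t
    else (x, s)

def minimalKSum_alt (nums : List Int) (k : Int) : Int :=
  let ns := PySem.List.sorted (nums ++ [0]) (fun y => y) false
  if k ≤ 0 then 0
  else
    -- nums[0]: ns is nonempty (it contains the appended 0), so headD is exact
    let m := ns.headD 0
    match bGo m (m + k) 0 ns with
    | (x, s) => PySem.Int.floordiv ((m + 1 + x) * (x - m)) 2 - s

-- ===== PRECONDITION & SPEC =====
-- Pre_ excludes negative k, outside the natural domain of 'append k integers' (A still returns
-- oddly-shaped values there, e.g. A([5], -3) = 3, which B does not reproduce).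
def Pre_minimalKSum (nums : List Int) (k : Int) : Prop := 0 ≤ k
instance (nums : List Int) (k : Int) : Decidable (Pre_minimalKSum nums k) := by unfold Pre_minimalKSum; infer_instance
def pvWitness_minimalKSum : List Int × Int := ([1, 3], 2)

def Spec_minimalKSum (nums : List Int) (k : Int) (out : Int) : Prop := out = minimalKSum_alt nums k
instance (nums : List Int) (k : Int) (out : Int) : Decidable (Spec_minimalKSum nums k out) := by unfold Spec_minimalKSum; infer_instance

-- ===== CLAIM (what is proved, stated in full; the proofs are below) =====
def Claim_equal_minimalKSum : Prop := ∀ (nums : List Int) (k : Int), Dom_minimalKSum nums k → Pre_minimalKSum nums k → Spec_minimalKSum nums k (minimalKSum nums k)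

-- ===== LEMMAS AND PROOFS =====

-- sum of the integers lo..hi as the closed form both programs use
def S (lo hi : Int) : Int := ((lo + hi) * (hi - lo + 1)) / 2

lemma two_dvd_S_num (lo hi : Int) : 2 ∣ (lo + hi) * (hi - lo + 1) := by
  rcases Int.even_or_odd (lo + hi) with h | h
  · obtain ⟨c, hc⟩ := h
    exact Dvd.dvd.mul_right ⟨c, by omega⟩ _
  · obtain ⟨c, hc⟩ := h
    exact Dvd.dvd.mul_left ⟨c - lo + 1, by omega⟩ _

lemma two_S (lo hi : Int) : 2 * S lo hi = (lo + hi) * (hi - lo + 1) :=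
  Int.mul_ediv_cancel' (two_dvd_S_num lo hi)

lemma S_split (a b x : Int) : S (a + 1) x = S (a + 1) (b - 1) + b + S (b + 1) x := by
  have h : 2 * S (a + 1) x = 2 * (S (a + 1) (b - 1) + b + S (b + 1) x) := by
    rw [mul_add, mul_add, two_S, two_S, two_S]; ring
  omega

lemma floordiv_eq_S (l r : Int) : PySem.Int.floordiv ((r + l) * (r - l + 1)) 2 = S l r := by
  rw [PySem.Int.floordiv_eq_ediv_of_pos (by norm_num)]
  unfold S; ring_nf

-- unfolding equations for A's loop
lemma aGo_dup (b : Int) (t : List (Int × Int)) (ans k : Int) :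
    aGo ((b, b) :: t) ans k = aGo t ans k := by
  simp [aGo]

lemma aGo_step {a b : Int} (t : List (Int × Int)) (ans k : Int) (h : ¬ a = b) :
    aGo ((a, b) :: t) ans k =
      if k - (min (a + k) (b - 1) - (a + 1) + 1) = 0 then
        (ans + PySem.Int.floordiv ((min (a + k) (b - 1) + (a + 1)) * (min (a + k) (b - 1) - (a + 1) + 1)) 2,
         k - (min (a + k) (b - 1) - (a + 1) + 1), true)
      else
        aGo t (ans + PySem.Int.floordiv ((min (a + k) (b - 1) + (a + 1)) * (min (a + k) (b - 1) - (a + 1) + 1)) 2)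
          (k - (min (a + k) (b - 1) - (a + 1) + 1)) := by
  simp [aGo, h]

-- A's whole remaining computation from the state "previous element a, rest of sorted list t"
def Afull (a : Int) (t : List Int) (ans k : Int) : Int :=
  match aGo ((a :: t).zip t) ans k with
  | (ans', k', early) =>
    if early then ans'
    else if 0 < k' then
      ans' + PySem.Int.floordiv (((a :: t).getLastD 0 + k' + ((a :: t).getLastD 0 + 1)) * ((a :: t).getLastD 0 + k' - ((a :: t).getLastD 0 + 1) + 1)) 2
    else ans'

lemma minimalKSum_eq_Afull (nums : List Int) (k m : Int) (t : List Int)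
    (h : PySem.List.sorted (nums ++ [0]) (fun y => y) false = m :: t) :
    minimalKSum nums k = Afull m t 0 k := by
  unfold minimalKSum Afull
  rw [h]
  rfl

lemma getLastD_cons_cons (a b : Int) (t : List Int) (d : Int) :
    (a :: b :: t).getLastD d = (b :: t).getLastD d := by
  simp [List.getLastD]

lemma Afull_nil (a ans k : Int) :
    Afull a [] ans k =
      if 0 < k then
        ans + PySem.Int.floordiv ((a + k + (a + 1)) * (a + k - (a + 1) + 1)) 2
      else ans := by
  unfold Afull
  rfl

lemma Afull_dup (a : Int) (t : List Int) (ans k : Int) :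
    Afull a (a :: t) ans k = Afull a t ans k := by
  unfold Afull
  rw [show (a :: a :: t).zip (a :: t) = (a, a) :: (a :: t).zip t from rfl, aGo_dup,
    getLastD_cons_cons]

lemma Afull_early {a b : Int} (t : List Int) (ans k : Int) (h : ¬ a = b)
    (hk' : k - (min (a + k) (b - 1) - (a + 1) + 1) = 0) :
    Afull a (b :: t) ans k
      = ans + PySem.Int.floordiv ((min (a + k) (b - 1) + (a + 1)) * (min (a + k) (b - 1) - (a + 1) + 1)) 2 := by
  unfold Afull
  rw [show (a :: b :: t).zip (b :: t) = (a, b) :: (b :: t).zip t from rfl, aGo_step _ _ _ h,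
    if_pos hk']
  rfl

lemma Afull_cont {a b : Int} (t : List Int) (ans k : Int) (h : ¬ a = b)
    (hk' : ¬ k - (min (a + k) (b - 1) - (a + 1) + 1) = 0) :
    Afull a (b :: t) ans k
      = Afull b t (ans + PySem.Int.floordiv ((min (a + k) (b - 1) + (a + 1)) * (min (a + k) (b - 1) - (a + 1) + 1)) 2)
          (k - (min (a + k) (b - 1) - (a + 1) + 1)) := by
  unfold Afull
  rw [show (a :: b :: t).zip (b :: t) = (a, b) :: (b :: t).zip t from rfl, aGo_step _ _ _ h,
    if_neg hk', getLastD_cons_cons]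

lemma bGo_nil (prev x s : Int) : bGo prev x s [] = (x, s) := rfl

lemma bGo_skip {prev v : Int} (x s : Int) (t : List Int) (h : v ≤ prev) :
    bGo prev x s (v :: t) = bGo prev x s t := by
  simp only [bGo, if_pos h]

lemma bGo_take {prev v : Int} (x s : Int) (t : List Int) (h1 : ¬ v ≤ prev) (h2 : v ≤ x) :
    bGo prev x s (v :: t) = bGo v (x + 1) (s + v) t := by
  simp only [bGo, if_neg h1, if_pos h2]

lemma bGo_break {prev v : Int} (x s : Int) (t : List Int) (h1 : ¬ v ≤ prev) (h2 : ¬ v ≤ x) :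
    bGo prev x s (v :: t) = (x, s) := by
  simp only [bGo, if_neg h1, if_neg h2]

-- B's accumulator s enters additively
lemma bGo_shift (t : List Int) : ∀ prev x s, bGo prev x s t = ((bGo prev x 0 t).1, s + (bGo prev x 0 t).2) := by
  induction t with
  | nil => intro prev x s; rw [bGo_nil, bGo_nil]; simp
  | cons v t ih =>
    intro prev x s
    by_cases h1 : v ≤ prev
    · rw [bGo_skip _ _ _ h1, bGo_skip _ _ _ h1, ih prev x s]
    · by_cases h2 : v ≤ x
      · rw [bGo_take _ _ _ h1 h2, bGo_take _ _ _ h1 h2,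
          ih v (x + 1) (s + v), ih v (x + 1) (0 + v)]
        simp only [Prod.mk.injEq]
        exact ⟨by trivial, by omega⟩
      · rw [bGo_break _ _ _ h1 h2, bGo_break _ _ _ h1 h2]
        simp

-- the main invariant: A's remaining run equals B's threshold scan + closed form, relative to a
lemma main_inv (t : List Int) : ∀ a ans k, (a :: t).Pairwise (fun p q => p ≤ q) → 1 ≤ k →
    Afull a t ans k = ans + (S (a + 1) (bGo a (a + k) 0 t).1 - (bGo a (a + k) 0 t).2) := by
  induction t with
  | nil =>
    intro a ans k _ hk
    rw [Afull_nil, if_pos (by omega), floordiv_eq_S]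
    simp [bGo]
  | cons b t ih =>
    intro a ans k hp hk
    rw [List.pairwise_cons] at hp
    have hab : a ≤ b := hp.1 b (List.mem_cons_self ..)
    have hp' : (b :: t).Pairwise (fun p q => p ≤ q) := hp.2
    by_cases heq : a = b
    · -- duplicate: both loops skip this element
      subst heq
      rw [Afull_dup, bGo_skip _ _ _ le_rfl]
      exact ih a ans k hp' hk
    · have hlt : a < b := lt_of_le_of_ne hab heq
      by_cases hfit : a + k ≤ b - 1
      · -- the whole remaining k fits in this gap: A returns early, B breaks
        have hmin : min (a + k) (b - 1) = a + k := min_eq_left hfit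
        rw [Afull_early t ans k heq (by rw [hmin]; ring), hmin, floordiv_eq_S,
          bGo_break _ _ _ (not_le.mpr hlt) (by omega)]
        simp
      · -- gap exhausted: A moves on, B takes b and raises the threshold by one
        have hble : b ≤ a + k := by omega
        have hmin : min (a + k) (b - 1) = b - 1 := min_eq_right (by omega)
        have hk1 : 1 ≤ k - (b - 1 - (a + 1) + 1) := by omega
        rw [Afull_cont t ans k heq (by rw [hmin]; omega), hmin, floordiv_eq_S,
          ih b _ _ hp' (by omega)]
        have hB : bGo a (a + k) 0 (b :: t)
            = ((bGo b (a + k + 1) 0 t).1, b + (bGo b (a + k + 1) 0 t).2) := by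
          rw [bGo_take _ _ _ (not_le.mpr hlt) hble, bGo_shift t b (a + k + 1) (0 + b)]
          simp only [Prod.mk.injEq]
          exact ⟨by trivial, by omega⟩
        have hB1 : (bGo a (a + k) 0 (b :: t)).1 = (bGo b (a + k + 1) 0 t).1 := by rw [hB]
        have hB2 : (bGo a (a + k) 0 (b :: t)).2 = b + (bGo b (a + k + 1) 0 t).2 := by rw [hB]
        rw [hB1, hB2]
        have hx : b + (k - (b - 1 - (a + 1) + 1)) = a + k + 1 := by ring
        rw [hx]
        have hsplit := S_split a b (bGo b (a + k + 1) 0 t).1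
        omega

-- for k = 0, A returns ans unchanged
lemma A_zero (t : List Int) : ∀ a ans, (a :: t).Pairwise (fun p q => p ≤ q) → Afull a t ans 0 = ans := by
  induction t with
  | nil =>
    intro a ans _
    rw [Afull_nil, if_neg (by omega)]
  | cons b t ih =>
    intro a ans hp
    rw [List.pairwise_cons] at hp
    have hab : a ≤ b := hp.1 b (List.mem_cons_self ..)
    have hp' : (b :: t).Pairwise (fun p q => p ≤ q) := hp.2
    by_cases heq : a = b
    · subst heq
      rw [Afull_dup]
      exact ih a ans hp'
    · have hlt : a < b := lt_of_le_of_ne hab heq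
      have hmin : min (a + 0) (b - 1) = a := by
        rw [min_eq_left (by omega)]; ring
      rw [Afull_early t ans 0 heq (by rw [hmin]; ring), hmin]
      have : a - (a + 1) + 1 = 0 := by ring
      rw [this, mul_zero]
      rw [PySem.Int.floordiv_eq_ediv_of_pos (by norm_num)]
      simp

-- ===== VERDICT (by name: the statement is the Claim_ definition above) =====
theorem minimalKSum_spec : Claim_equal_minimalKSum := by
  intro nums k _ hpre
  unfold Spec_minimalKSum
  -- decompose the sorted list (nonempty: it contains the appended 0)
  have h0 : (0 : Int) ∈ PySem.List.sorted (nums ++ [0]) (fun y => y) false := by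
    rw [PySem.List.mem_sorted]; simp
  cases hns : PySem.List.sorted (nums ++ [0]) (fun y => y) false with
  | nil => rw [hns] at h0; simp at h0
  | cons m t =>
    have hpair : (m :: t).Pairwise (fun p q => p ≤ q) := by
      have h := PySem.List.sorted_pairwise (nums ++ [0]) (fun y => y)
      rw [hns] at h
      exact h
    have hBskip : bGo m (m + k) 0 (m :: t) = bGo m (m + k) 0 t :=
      bGo_skip _ _ _ le_rfl
    by_cases hk : k = 0
    · -- k = 0 (Pre_ gives 0 ≤ k)
      subst hk
      rw [minimalKSum_eq_Afull nums 0 m t hns, A_zero t m 0 hpair]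
      unfold minimalKSum_alt
      rw [hns, if_pos le_rfl]
    · -- k ≥ 1
      have hk1 : 1 ≤ k := by
        unfold Pre_minimalKSum at hpre; omega
      rw [minimalKSum_eq_Afull nums k m t hns, main_inv t m 0 k hpair hk1]
      unfold minimalKSum_alt
      rw [hns, if_neg (by omega)]
      simp only [List.headD, hBskip]
      rcases hbg : bGo m (m + k) 0 t with ⟨x, s⟩
      show 0 + (S (m + 1) x - s) = PySem.Int.floordiv ((m + 1 + x) * (x - m)) 2 - s
      rw [show PySem.Int.floordiv ((m + 1 + x) * (x - m)) 2 = S (m + 1) x from by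
        rw [PySem.Int.floordiv_eq_ediv_of_pos (by norm_num)]; unfold S; ring_nf]
      omega
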